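-- pv_equiv track=rewrite | github.com/macrocosm-os/finetuning | finetune/datasets/generated/dyck_loader.py | count_contiguous_matching_suffix_characters
-- ===== SOURCE A (Python) =====
-- import typing
--
-- def count_contiguous_matching_suffix_characters(
--     word: str, characters: typing.Set[str]
-- ) -> int:
--     """Count the number of contiguous characters from the end of the word that are in the specified set.
--
--     Args:
--         word (str): Word to check for number of continous matching suffix characters.
--         characters (typing.Set[str]):Characters to match on.
--
--     Returns:
--         int: Number of characters from the end of the word that all match the characters specified.
--     """
--     char_count = 0
--     for char in reversed(word):
--         if char in characters:
--             char_count += 1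
--         else:
--             break
--     return char_count
-- ===== SOURCE B (Python) =====
-- import typing
--
-- def count_contiguous_matching_suffix_characters(
--     word: str, characters: typing.Set[str]
-- ) -> int:
--     streak = 0
--     for char in word:
--         if char in characters:
--             streak += 1
--         else:
--             streak = 0
--     return streak
-- ===== Notes on version B (the rewrite author's own statement) =====
-- stated objective: alternative
-- what changed: Replaces the backward scan with an early break by a single forward pass maintaining a resettable run counter; the counter ends as the length of the final contiguous matching run.
import Mathlib
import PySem

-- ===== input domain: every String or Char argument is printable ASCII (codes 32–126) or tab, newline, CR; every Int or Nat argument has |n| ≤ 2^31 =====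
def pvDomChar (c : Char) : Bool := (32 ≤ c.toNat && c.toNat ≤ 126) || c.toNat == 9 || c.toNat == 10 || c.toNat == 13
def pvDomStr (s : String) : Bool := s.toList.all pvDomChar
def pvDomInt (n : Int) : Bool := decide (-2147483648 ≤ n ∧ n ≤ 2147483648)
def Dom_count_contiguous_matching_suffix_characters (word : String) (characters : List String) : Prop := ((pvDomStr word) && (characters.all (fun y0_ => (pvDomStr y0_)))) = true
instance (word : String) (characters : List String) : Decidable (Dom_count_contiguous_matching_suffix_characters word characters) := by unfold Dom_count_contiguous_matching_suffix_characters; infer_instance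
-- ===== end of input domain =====

-- B replaces A's backward scan with early break by a single forward pass with a resettable run counter (alternative decomposition, same cost).

-- ===== PORT A =====
-- Port of A: scan reversed(word), count while chars are in the set, break at first miss.
def pvGoA (characters : List String) : List Char → Int
  | [] => 0
  | c :: rest => if String.singleton c ∈ characters then 1 + pvGoA characters rest else 0

def count_contiguous_matching_suffix_characters (word : String) (characters : List String) : Int :=
  pvGoA characters word.toList.reverse

-- ===== PORT B =====
-- Port of B: forward fold; increment the streak on a match, reset it to 0 otherwise.
def count_contiguous_matching_suffix_characters_alt (word : String) (characters : List String) : Int :=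
  word.toList.foldl (fun streak c => if String.singleton c ∈ characters then streak + 1 else 0) 0

-- ===== PRECONDITION & SPEC =====
def Spec_count_contiguous_matching_suffix_characters (word : String) (characters : List String) (out : Int) : Prop := out = count_contiguous_matching_suffix_characters_alt word characters
instance (word : String) (characters : List String) (out : Int) : Decidable (Spec_count_contiguous_matching_suffix_characters word characters out) := by unfold Spec_count_contiguous_matching_suffix_characters; infer_instance

-- ===== CLAIM (what is proved, stated in full; the proofs are below) =====
def Claim_equal_count_contiguous_matching_suffix_characters : Prop := ∀ (word : String) (characters : List String), Dom_count_contiguous_matching_suffix_characters word characters → Spec_count_contiguous_matching_suffix_characters word characters (count_contiguous_matching_suffix_characters word characters)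

-- ===== LEMMAS AND PROOFS =====
theorem pvFoldl_char (characters : List String) (l : List Char) (s : Int) :
    l.foldl (fun streak c => if String.singleton c ∈ characters then streak + 1 else 0) s =
      if ∀ c ∈ l, String.singleton c ∈ characters then s + l.length
      else pvGoA characters l.reverse := by
  induction l using List.reverseRecOn generalizing s with
  | nil => simp
  | append_singleton t c ih =>
    rw [List.foldl_append, List.foldl_cons, List.foldl_nil, ih, List.reverse_append]
    simp only [List.reverse_singleton, List.singleton_append, pvGoA, List.length_append,
      List.length_singleton]
    by_cases hc : String.singleton c ∈ characters
    · by_cases ht : ∀ x ∈ t, String.singleton x ∈ characters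
      · have hall : ∀ x ∈ t ++ [c], String.singleton x ∈ characters := by
          intro x hx
          rcases List.mem_append.mp hx with h | h
          · exact ht x h
          · rw [List.mem_singleton.mp h]; exact hc
        rw [if_pos ht, if_pos hc, if_pos hall]
        push_cast; ring
      · have hnall : ¬ ∀ x ∈ t ++ [c], String.singleton x ∈ characters := by
          intro h; exact ht fun x hx => h x (List.mem_append.mpr (Or.inl hx))
        rw [if_neg ht, if_pos hc, if_neg hnall, if_pos hc]
        ring
    · have hnall : ¬ ∀ x ∈ t ++ [c], String.singleton x ∈ characters := by
        intro h; exact hc (h c (List.mem_append.mpr (Or.inr (List.mem_singleton.mpr rfl))))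
      rw [if_neg hc, if_neg hnall, if_neg hc]

theorem pvGoA_all (characters : List String) (l : List Char)
    (h : ∀ c ∈ l, String.singleton c ∈ characters) : pvGoA characters l = l.length := by
  induction l with
  | nil => simp [pvGoA]
  | cons c t ih =>
    have hc := h c (List.mem_cons_self ..)
    simp [pvGoA, hc, ih fun x hx => h x (List.mem_cons_of_mem _ hx)]
    ring


-- ===== VERDICT (by name: the statement is the Claim_ definition above) =====
theorem count_contiguous_matching_suffix_characters_spec : Claim_equal_count_contiguous_matching_suffix_characters := by
  intro word characters _
  unfold Spec_count_contiguous_matching_suffix_characters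
  unfold count_contiguous_matching_suffix_characters count_contiguous_matching_suffix_characters_alt
  rw [pvFoldl_char]
  by_cases h : ∀ c ∈ word.toList, String.singleton c ∈ characters
  · rw [if_pos h, pvGoA_all characters _ (by simpa using h)]
    simp
  · rw [if_neg h]
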